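-- pv_equiv track=rewrite | github.com/gtri/5G_slice_mobility_security | live_data_pipeline.py | split_samples_per_slice
-- ===== SOURCE A (Python) =====
-- def split_samples_per_slice(collected_slice_samples, slice_samples):
--     # Splits the raw samples for the entire core into 1 sample per slice
--     # slice_samples: List of dictionaries [{'1-111111': {timestamp: {features}}}, {'1-222222': {timestamp: {features}}}, ... ]
--     slice_labels = [('1-111111','10.1.0.138:9090'),
--                     ('1-222222','10.1.0.201:9090'),
--                     ('2-333333','10.1.0.228:9090'),
--                     ('2-444444','10.1.0.33:9090'),
--                     ('3-555555','10.1.0.76:9090'),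
--                     ('3-666666','10.1.0.232:9090')]
--
--     for timestamp, features in collected_slice_samples.items():
--         for slice_id in slice_labels:
--             sub_dict = {feature:value for feature, value in features.items() if any(id_ in feature for id_ in slice_id)} #| (not any(x in feature for x in list(sum(slice_labels, ())) ))}
--             slice_samples[slice_id[0]][timestamp] = sub_dict
--
--     return slice_samples
-- ===== SOURCE B (Python) =====
-- def split_samples_per_slice(collected_slice_samples, slice_samples):
--     # One distributing pass per timestamp: build all six slice buckets in a single
--     # scan over the features, then assign each bucket (as a dict) to its slice.
--     # Mutates slice_samples in place, like the original.
--     slice_labels = [('1-111111','10.1.0.138:9090'),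
--                     ('1-222222','10.1.0.201:9090'),
--                     ('2-333333','10.1.0.228:9090'),
--                     ('2-444444','10.1.0.33:9090'),
--                     ('3-555555','10.1.0.76:9090'),
--                     ('3-666666','10.1.0.232:9090')]
--     for timestamp, features in collected_slice_samples.items():
--         buckets = {sid: [] for sid, _ in slice_labels}
--         for feature, value in features.items():
--             for sid, addr in slice_labels:
--                 if sid in feature or addr in feature:
--                     buckets[sid].append((feature, value))
--         for sid, _ in slice_labels:
--             slice_samples[sid][timestamp] = dict(buckets[sid])
--     return slice_samples
-- ===== Notes on version B (the rewrite author's own statement) =====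
-- stated objective: alternative
-- what changed: Instead of rescanning the whole feature dict once per slice (six redundant passes per timestamp), B makes a single distributing pass over the features per timestamp, appending each feature to the bucket of every slice whose id or address occurs in its name, then assigns the buckets.
import Mathlib
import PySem

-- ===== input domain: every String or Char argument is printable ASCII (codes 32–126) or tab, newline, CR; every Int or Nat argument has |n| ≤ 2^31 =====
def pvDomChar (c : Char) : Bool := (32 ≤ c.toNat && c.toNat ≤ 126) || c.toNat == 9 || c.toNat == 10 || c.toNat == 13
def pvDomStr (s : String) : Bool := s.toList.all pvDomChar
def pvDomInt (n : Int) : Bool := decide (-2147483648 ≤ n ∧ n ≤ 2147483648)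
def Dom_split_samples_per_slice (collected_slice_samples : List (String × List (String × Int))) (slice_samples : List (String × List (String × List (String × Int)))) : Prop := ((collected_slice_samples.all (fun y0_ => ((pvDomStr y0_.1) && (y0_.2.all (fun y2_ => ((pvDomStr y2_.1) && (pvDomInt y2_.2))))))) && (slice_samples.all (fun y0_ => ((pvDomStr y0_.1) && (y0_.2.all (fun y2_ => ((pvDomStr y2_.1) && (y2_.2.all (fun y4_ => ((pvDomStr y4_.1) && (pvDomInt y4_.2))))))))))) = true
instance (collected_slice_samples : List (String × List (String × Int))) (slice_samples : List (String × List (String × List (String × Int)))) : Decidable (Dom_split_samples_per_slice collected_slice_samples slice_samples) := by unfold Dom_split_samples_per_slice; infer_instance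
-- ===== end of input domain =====

-- B replaces A's six feature-dict rescans per timestamp by one distributing pass that fills all
-- six slice buckets at once (alternative decomposition, same cost). Both versions mutate
-- slice_samples in place in Python; the equivalence proved here is about the return value.

-- ===== PORT A =====
-- the fixed slice_labels table of A (B uses the same literal table)
def pvSliceLabels : List (String × String) :=
  [("1-111111", "10.1.0.138:9090"),
   ("1-222222", "10.1.0.201:9090"),
   ("2-333333", "10.1.0.228:9090"),
   ("2-444444", "10.1.0.33:9090"),
   ("3-555555", "10.1.0.76:9090"),
   ("3-666666", "10.1.0.232:9090")]

-- `slice_samples[k][ts] = sub` (both Pythons do this assignment); `none` = KeyError, excluded by Pre_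
def pvSetTs (ss : List (String × List (String × List (String × Int)))) (k ts : String)
    (sub : List (String × Int)) : List (String × List (String × List (String × Int))) :=
  match (PySem.Dict.mk ss).get? k with
  | some inner => ((PySem.Dict.mk ss).insert k ((PySem.Dict.mk inner).insert ts sub).items).items
  | none => ss

def split_samples_per_slice (collected_slice_samples : List (String × List (String × Int))) (slice_samples : List (String × List (String × List (String × Int)))) : List (String × List (String × List (String × Int))) :=
  collected_slice_samples.foldl (fun ss tf =>
    pvSliceLabels.foldl (fun ss slice_id =>
      -- dict comprehension over features with `any(id_ in feature for id_ in slice_id)`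
      let sub_dict := tf.2.filter (fun fv => [slice_id.1, slice_id.2].any (fun id_ => PySem.Str.isIn id_ fv.1))
      pvSetTs ss slice_id.1 tf.1 sub_dict) ss) slice_samples

-- ===== PORT B =====
-- `buckets = {sid: [] for sid, _ in slice_labels}`
def pvInitBuckets : PySem.Dict String (List (String × Int)) :=
  pvSliceLabels.foldl (fun d sl => d.insert sl.1 []) PySem.Dict.empty

-- body of B's distributing pass: append the feature to every matching slice's bucket
def pvBucketStep (bs : PySem.Dict String (List (String × Int))) (fv : String × Int) :
    PySem.Dict String (List (String × Int)) :=
  pvSliceLabels.foldl (fun bs sl =>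
    if PySem.Str.isIn sl.1 fv.1 || PySem.Str.isIn sl.2 fv.1
    then bs.modify sl.1 [] (· ++ [fv]) else bs) bs

-- `dict(pairs)`
def pvDictOf (l : List (String × Int)) : List (String × Int) :=
  (l.foldl (fun d p => PySem.Dict.insert d p.1 p.2) PySem.Dict.empty).items

def split_samples_per_slice_alt (collected_slice_samples : List (String × List (String × Int))) (slice_samples : List (String × List (String × List (String × Int)))) : List (String × List (String × List (String × Int))) :=
  collected_slice_samples.foldl (fun ss tf =>
    let buckets := tf.2.foldl pvBucketStep pvInitBuckets
    pvSliceLabels.foldl (fun ss sl =>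
      pvSetTs ss sl.1 tf.1 (pvDictOf (buckets.getD sl.1 []))) ss) slice_samples

-- ===== PRECONDITION & SPEC =====
-- Pre_ excludes inputs with a non-empty collected_slice_samples that miss one of the six slice ids
-- among slice_samples' keys (there the Python raises KeyError) and association lists with duplicate
-- keys at any dict level (not representable as Python dict inputs, so the list ports are only
-- claimed faithful without them).
def Pre_split_samples_per_slice (collected_slice_samples : List (String × List (String × Int))) (slice_samples : List (String × List (String × List (String × Int)))) : Prop :=
  (collected_slice_samples = [] ∨
    ∀ k ∈ (["1-111111", "1-222222", "2-333333", "2-444444", "3-555555", "3-666666"] : List String),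
      k ∈ slice_samples.map Prod.fst)
  ∧ (collected_slice_samples.map Prod.fst).Nodup
  ∧ (∀ tf ∈ collected_slice_samples, (tf.2.map Prod.fst).Nodup)
  ∧ (slice_samples.map Prod.fst).Nodup
  ∧ (∀ sv ∈ slice_samples, (sv.2.map Prod.fst).Nodup ∧ ∀ t ∈ sv.2, (t.2.map Prod.fst).Nodup)
instance (collected_slice_samples : List (String × List (String × Int))) (slice_samples : List (String × List (String × List (String × Int)))) : Decidable (Pre_split_samples_per_slice collected_slice_samples slice_samples) := by unfold Pre_split_samples_per_slice; infer_instance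

def pvWitness_split_samples_per_slice : (List (String × List (String × Int))) × (List (String × List (String × List (String × Int)))) :=
  ([("t", [("1-111111_load", 5), ("other", 7)])],
   [("1-111111", []), ("1-222222", []), ("2-333333", []),
    ("2-444444", []), ("3-555555", []), ("3-666666", [])])

def Spec_split_samples_per_slice (collected_slice_samples : List (String × List (String × Int))) (slice_samples : List (String × List (String × List (String × Int)))) (out : List (String × List (String × List (String × Int)))) : Prop := out = split_samples_per_slice_alt collected_slice_samples slice_samples
instance (collected_slice_samples : List (String × List (String × Int))) (slice_samples : List (String × List (String × List (String × Int)))) (out : List (String × List (String × List (String × Int)))) : Decidable (Spec_split_samples_per_slice collected_slice_samples slice_samples out) := by unfold Spec_split_samples_per_slice; infer_instance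

-- ===== CLAIM (what is proved, stated in full; the proofs are below) =====
def Claim_equal_split_samples_per_slice : Prop := ∀ (collected_slice_samples : List (String × List (String × Int))) (slice_samples : List (String × List (String × List (String × Int)))), Dom_split_samples_per_slice collected_slice_samples slice_samples → Pre_split_samples_per_slice collected_slice_samples slice_samples → Spec_split_samples_per_slice collected_slice_samples slice_samples (split_samples_per_slice collected_slice_samples slice_samples)

-- ===== LEMMAS AND PROOFS =====

-- each of the six buckets starts empty
theorem pvInitBuckets_getD (sl : String × String) (h : sl ∈ pvSliceLabels) :
    pvInitBuckets.getD sl.1 [] = [] := by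
  fin_cases h <;> decide

-- a conditional-modify pass over labels whose keys avoid k leaves bucket k alone
theorem pvCondModify_getD_notMem (p : String × String → Bool) (fv : String × Int)
    (k : String) :
    ∀ (labels : List (String × String)) (bs : PySem.Dict String (List (String × Int))),
      k ∉ labels.map Prod.fst →
      (labels.foldl (fun bs l => if p l then bs.modify l.1 [] (· ++ [fv]) else bs) bs).getD k []
        = bs.getD k [] := by
  intro labels
  induction labels with
  | nil => intro bs _; rfl
  | cons l ls ih =>
    intro bs hk
    simp only [List.map_cons, List.mem_cons, not_or] at hk
    rw [List.foldl_cons, ih _ hk.2]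
    split
    · rw [PySem.Dict.getD_modify]; simp [hk.1]
    · rfl

-- a conditional-modify pass over labels with distinct keys appends fv to exactly the
-- buckets of the labels satisfying p
theorem pvCondModify_getD (p : String × String → Bool) (fv : String × Int)
    (sl : String × String) :
    ∀ (labels : List (String × String)) (bs : PySem.Dict String (List (String × Int))),
      sl ∈ labels → (labels.map Prod.fst).Nodup →
      (labels.foldl (fun bs l => if p l then bs.modify l.1 [] (· ++ [fv]) else bs) bs).getD sl.1 []
        = bs.getD sl.1 [] ++ (if p sl then [fv] else []) := by
  intro labels
  induction labels with
  | nil => intro bs h; exact absurd h (List.not_mem_nil)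
  | cons l ls ih =>
    intro bs hmem hnd
    simp only [List.map_cons, List.nodup_cons] at hnd
    rcases List.mem_cons.mp hmem with heq | hmem'
    · subst heq
      rw [List.foldl_cons, pvCondModify_getD_notMem p fv _ ls _ hnd.1]
      split
      · rw [PySem.Dict.getD_modify_self]
      · simp
    · have hne : sl.1 ≠ l.1 := by
        intro h
        exact hnd.1 (h ▸ List.mem_map_of_mem hmem')
      rw [List.foldl_cons, ih _ hmem' hnd.2]
      split
      · rw [PySem.Dict.getD_modify]; simp [hne]
      · rfl

-- the label keys of the fixed table are distinct
theorem pvSliceLabels_nodup : (pvSliceLabels.map Prod.fst).Nodup := by decide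

-- the distributing pass fills each slice's bucket with exactly the features A's filter keeps
theorem pvBucket_getD (sl : String × String) (h : sl ∈ pvSliceLabels) :
    ∀ (fs : List (String × Int)) (bs : PySem.Dict String (List (String × Int))),
      (fs.foldl pvBucketStep bs).getD sl.1 [] =
        bs.getD sl.1 [] ++ fs.filter (fun fv => PySem.Str.isIn sl.1 fv.1 || PySem.Str.isIn sl.2 fv.1) := by
  intro fs
  induction fs with
  | nil => intro bs; simp
  | cons fv fs ih =>
    intro bs
    rw [List.foldl_cons, ih, List.filter_cons]
    rw [pvBucketStep, pvCondModify_getD _ fv sl pvSliceLabels bs h pvSliceLabels_nodup]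
    split_ifs <;> simp

-- dict(pairs) over distinct keys is the identity on the association list
theorem pvDictOf_of_nodup (l : List (String × Int)) (h : (l.map Prod.fst).Nodup) :
    pvDictOf l = l := by
  have := PySem.Dict.items_foldl_insert_fresh (l := l) (k := Prod.fst) (v := Prod.snd)
      (d := PySem.Dict.empty) (by intro a _; exact PySem.Dict.contains_empty _) h
  simpa [pvDictOf] using this

-- ===== VERDICT (by name: the statement is the Claim_ definition above) =====
theorem split_samples_per_slice_spec : Claim_equal_split_samples_per_slice := by
  intro css ss _ hpre
  unfold Spec_split_samples_per_slice split_samples_per_slice split_samples_per_slice_alt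
  apply PySem.List.foldl_congr_mem'
  intro tf htf acc
  have hn : (tf.2.map Prod.fst).Nodup := hpre.2.2.1 tf htf
  simp only []
  apply PySem.List.foldl_congr_mem'
  intro sl hsl acc'
  congr 1
  rw [pvBucket_getD sl hsl, pvInitBuckets_getD sl hsl, List.nil_append]
  rw [pvDictOf_of_nodup _ (by
    have hsub : List.Sublist
        ((tf.2.filter (fun fv => PySem.Str.isIn sl.1 fv.1 || PySem.Str.isIn sl.2 fv.1)).map Prod.fst)
        (tf.2.map Prod.fst) := List.Sublist.map Prod.fst List.filter_sublist
    exact hn.sublist hsub)]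
  apply List.filter_congr
  intro fv _
  simp
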